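-- pv_equiv track=rewrite | github.com/GabeLukij/math-tools | tools.py | upper_primorial_lim
-- ===== SOURCE A (Python) =====
-- import math
--
-- def upper_primorial_lim(n):
--     """
--     This function takes an integer n and returns the order of the smallest primorial number larger than n.
--     The kth primorial number is the product of the first k primes.
--     """
--     primes = [2]
--     i = 3
--     primorial = 2
--     while primorial < n:
--         prime_check = True
--         for prime in primes:
--             if prime > math.sqrt(i):
--                 break
--             if i % prime == 0:
--                 prime_check = False
--                 break
--         if prime_check:
--             primes.append(i)
--             primorial *= i
--         i += 1
--     return len(primes)
-- ===== SOURCE B (Python) =====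
-- # Different algorithm: primes come from a Sieve of Eratosthenes over a doubling
-- # bound (bit array, no trial division), then a scan multiplies them into the
-- # primorial until it reaches n.
-- def _sieve(limit):
--     """Primes below limit via the Sieve of Eratosthenes."""
--     composite = bytearray(limit)
--     primes = []
--     for i in range(2, limit):
--         if not composite[i]:
--             primes.append(i)
--             for j in range(i * i, limit, i):
--                 composite[j] = 1
--     return primes
--
-- def upper_primorial_lim(n):
--     limit = 16
--     while True:
--         primorial = 1
--         count = 0
--         for p in _sieve(limit):
--             primorial *= p
--             count += 1
--             if primorial >= n:
--                 return count
--         limit *= 2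
-- ===== Notes on version B (the rewrite author's own statement) =====
-- stated objective: alternative
-- what changed: A discovers each prime by trial-dividing candidates against the list of primes found so far inside one interleaved loop; B instead generates primes with a Sieve of Eratosthenes (bit array of composites, no division) over a doubling bound and scans the sieved prime list, multiplying into the primorial until it reaches n.
import Mathlib
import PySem

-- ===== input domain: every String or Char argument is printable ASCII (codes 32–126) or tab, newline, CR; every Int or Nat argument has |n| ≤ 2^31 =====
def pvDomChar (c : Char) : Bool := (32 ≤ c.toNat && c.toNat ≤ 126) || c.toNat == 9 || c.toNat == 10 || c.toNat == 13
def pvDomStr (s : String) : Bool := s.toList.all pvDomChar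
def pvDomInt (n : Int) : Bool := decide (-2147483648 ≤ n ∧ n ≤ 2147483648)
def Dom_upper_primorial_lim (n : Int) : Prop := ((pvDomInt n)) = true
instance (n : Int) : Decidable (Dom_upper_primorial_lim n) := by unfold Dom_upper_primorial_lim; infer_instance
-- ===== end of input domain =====

-- B replaces A's interleaved trial-division prime discovery by a Sieve of
-- Eratosthenes over a doubling bound, then a scan that multiplies the sieved
-- primes into the primorial until it reaches n (objective: alternative algorithm).

-- ===== PORT A =====
-- the 'for prime in primes' loop; 'prime > math.sqrt(i)' is ported as prime*prime > i,
-- exact here since prime and i are integers (sqrt is exact or irrational in this range)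
def pvCheckA : List Int → Int → Bool
  | [], _ => true
  | p :: ps, i =>
    if p * p > i then true
    else if PySem.Int.mod i p = 0 then false
    else pvCheckA ps i
-- the while loop; fuel only makes the recursion total, it is never exhausted on Dom
def pvLoopA : Nat → List Int → Int → Int → Int → Int
  | 0, primes, _, _, _ => (primes.length : Int)
  | f + 1, primes, i, primorial, n =>
    if primorial < n then
      if pvCheckA primes i then pvLoopA f (primes ++ [i]) (i + 1) (primorial * i) n
      else pvLoopA f primes (i + 1) primorial n
    else (primes.length : Int)

def upper_primorial_lim (n : Int) : Int := pvLoopA 34 [2] 3 2 n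

-- ===== PORT B =====
-- _sieve: the bytearray of composite flags is a List Bool; the two Python
-- range loops are folds over PySem.List.pyRange
def pvSieve (limit : Int) : List Int :=
  ((PySem.List.pyRange 2 limit 1).foldl
    (fun (st : List Bool × List Int) i =>
      if st.1.getD i.toNat false = false then
        ((PySem.List.pyRange (i * i) limit i).foldl (fun c j => c.set j.toNat true) st.1,
         st.2 ++ [i])
      else st)
    (List.replicate limit.toNat false, [])).2
-- the 'for p in _sieve(limit)' loop; none = the for-loop fell through
def pvConsumeB : List Int → Int → Int → Int → Option Int
  | [], _, _, _ => none
  | p :: ps, primorial, count, n =>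
    if n ≤ primorial * p then some (count + 1)
    else pvConsumeB ps (primorial * p) (count + 1) n
-- the 'while True' loop with doubling limit; fuel is a totality guard, never exhausted on Dom
def pvOuterB : Nat → Int → Int → Int
  | 0, _, _ => 0
  | f + 1, limit, n =>
    match pvConsumeB (pvSieve limit) 1 0 n with
    | some c => c
    | none => pvOuterB f (limit * 2) n

def upper_primorial_lim_alt (n : Int) : Int := pvOuterB 2 16 n

-- ===== PRECONDITION & SPEC =====
def Spec_upper_primorial_lim (n : Int) (out : Int) : Prop := out = upper_primorial_lim_alt n
instance (n : Int) (out : Int) : Decidable (Spec_upper_primorial_lim n out) := by unfold Spec_upper_primorial_lim; infer_instance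

-- ===== CLAIM (what is proved, stated in full; the proofs are below) =====
def Claim_equal_upper_primorial_lim : Prop := ∀ (n : Int), Dom_upper_primorial_lim n → Spec_upper_primorial_lim n (upper_primorial_lim n)

-- ===== LEMMAS AND PROOFS =====
theorem pvA0 (n : Int) : pvLoopA 34 [2] 3 2 n = if (2:Int) < n then pvLoopA 33 [2, 3] 4 6 n else 1 := by rfl
theorem pvA1 (n : Int) : pvLoopA 33 [2, 3] 4 6 n = if (6:Int) < n then pvLoopA 32 [2, 3] 5 6 n else 2 := by rfl
theorem pvA2 (n : Int) : pvLoopA 32 [2, 3] 5 6 n = if (6:Int) < n then pvLoopA 31 [2, 3, 5] 6 30 n else 2 := by rfl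
theorem pvA3 (n : Int) : pvLoopA 31 [2, 3, 5] 6 30 n = if (30:Int) < n then pvLoopA 30 [2, 3, 5] 7 30 n else 3 := by rfl
theorem pvA4 (n : Int) : pvLoopA 30 [2, 3, 5] 7 30 n = if (30:Int) < n then pvLoopA 29 [2, 3, 5, 7] 8 210 n else 3 := by rfl
theorem pvA5 (n : Int) : pvLoopA 29 [2, 3, 5, 7] 8 210 n = if (210:Int) < n then pvLoopA 28 [2, 3, 5, 7] 9 210 n else 4 := by rfl
theorem pvA6 (n : Int) : pvLoopA 28 [2, 3, 5, 7] 9 210 n = if (210:Int) < n then pvLoopA 27 [2, 3, 5, 7] 10 210 n else 4 := by rfl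
theorem pvA7 (n : Int) : pvLoopA 27 [2, 3, 5, 7] 10 210 n = if (210:Int) < n then pvLoopA 26 [2, 3, 5, 7] 11 210 n else 4 := by rfl
theorem pvA8 (n : Int) : pvLoopA 26 [2, 3, 5, 7] 11 210 n = if (210:Int) < n then pvLoopA 25 [2, 3, 5, 7, 11] 12 2310 n else 4 := by rfl
theorem pvA9 (n : Int) : pvLoopA 25 [2, 3, 5, 7, 11] 12 2310 n = if (2310:Int) < n then pvLoopA 24 [2, 3, 5, 7, 11] 13 2310 n else 5 := by rfl
theorem pvA10 (n : Int) : pvLoopA 24 [2, 3, 5, 7, 11] 13 2310 n = if (2310:Int) < n then pvLoopA 23 [2, 3, 5, 7, 11, 13] 14 30030 n else 5 := by rfl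
theorem pvA11 (n : Int) : pvLoopA 23 [2, 3, 5, 7, 11, 13] 14 30030 n = if (30030:Int) < n then pvLoopA 22 [2, 3, 5, 7, 11, 13] 15 30030 n else 6 := by rfl
theorem pvA12 (n : Int) : pvLoopA 22 [2, 3, 5, 7, 11, 13] 15 30030 n = if (30030:Int) < n then pvLoopA 21 [2, 3, 5, 7, 11, 13] 16 30030 n else 6 := by rfl
theorem pvA13 (n : Int) : pvLoopA 21 [2, 3, 5, 7, 11, 13] 16 30030 n = if (30030:Int) < n then pvLoopA 20 [2, 3, 5, 7, 11, 13] 17 30030 n else 6 := by rfl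
theorem pvA14 (n : Int) : pvLoopA 20 [2, 3, 5, 7, 11, 13] 17 30030 n = if (30030:Int) < n then pvLoopA 19 [2, 3, 5, 7, 11, 13, 17] 18 510510 n else 6 := by rfl
theorem pvA15 (n : Int) : pvLoopA 19 [2, 3, 5, 7, 11, 13, 17] 18 510510 n = if (510510:Int) < n then pvLoopA 18 [2, 3, 5, 7, 11, 13, 17] 19 510510 n else 7 := by rfl
theorem pvA16 (n : Int) : pvLoopA 18 [2, 3, 5, 7, 11, 13, 17] 19 510510 n = if (510510:Int) < n then pvLoopA 17 [2, 3, 5, 7, 11, 13, 17, 19] 20 9699690 n else 7 := by rfl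
theorem pvA17 (n : Int) : pvLoopA 17 [2, 3, 5, 7, 11, 13, 17, 19] 20 9699690 n = if (9699690:Int) < n then pvLoopA 16 [2, 3, 5, 7, 11, 13, 17, 19] 21 9699690 n else 8 := by rfl
theorem pvA18 (n : Int) : pvLoopA 16 [2, 3, 5, 7, 11, 13, 17, 19] 21 9699690 n = if (9699690:Int) < n then pvLoopA 15 [2, 3, 5, 7, 11, 13, 17, 19] 22 9699690 n else 8 := by rfl
theorem pvA19 (n : Int) : pvLoopA 15 [2, 3, 5, 7, 11, 13, 17, 19] 22 9699690 n = if (9699690:Int) < n then pvLoopA 14 [2, 3, 5, 7, 11, 13, 17, 19] 23 9699690 n else 8 := by rfl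
theorem pvA20 (n : Int) : pvLoopA 14 [2, 3, 5, 7, 11, 13, 17, 19] 23 9699690 n = if (9699690:Int) < n then pvLoopA 13 [2, 3, 5, 7, 11, 13, 17, 19, 23] 24 223092870 n else 8 := by rfl
theorem pvA21 (n : Int) : pvLoopA 13 [2, 3, 5, 7, 11, 13, 17, 19, 23] 24 223092870 n = if (223092870:Int) < n then pvLoopA 12 [2, 3, 5, 7, 11, 13, 17, 19, 23] 25 223092870 n else 9 := by rfl
theorem pvA22 (n : Int) : pvLoopA 12 [2, 3, 5, 7, 11, 13, 17, 19, 23] 25 223092870 n = if (223092870:Int) < n then pvLoopA 11 [2, 3, 5, 7, 11, 13, 17, 19, 23] 26 223092870 n else 9 := by rfl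
theorem pvA23 (n : Int) : pvLoopA 11 [2, 3, 5, 7, 11, 13, 17, 19, 23] 26 223092870 n = if (223092870:Int) < n then pvLoopA 10 [2, 3, 5, 7, 11, 13, 17, 19, 23] 27 223092870 n else 9 := by rfl
theorem pvA24 (n : Int) : pvLoopA 10 [2, 3, 5, 7, 11, 13, 17, 19, 23] 27 223092870 n = if (223092870:Int) < n then pvLoopA 9 [2, 3, 5, 7, 11, 13, 17, 19, 23] 28 223092870 n else 9 := by rfl
theorem pvA25 (n : Int) : pvLoopA 9 [2, 3, 5, 7, 11, 13, 17, 19, 23] 28 223092870 n = if (223092870:Int) < n then pvLoopA 8 [2, 3, 5, 7, 11, 13, 17, 19, 23] 29 223092870 n else 9 := by rfl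
theorem pvA26 (n : Int) : pvLoopA 8 [2, 3, 5, 7, 11, 13, 17, 19, 23] 29 223092870 n = if (223092870:Int) < n then pvLoopA 7 [2, 3, 5, 7, 11, 13, 17, 19, 23, 29] 30 6469693230 n else 9 := by rfl
theorem pvA27 (n : Int) : pvLoopA 7 [2, 3, 5, 7, 11, 13, 17, 19, 23, 29] 30 6469693230 n = if (6469693230:Int) < n then pvLoopA 6 [2, 3, 5, 7, 11, 13, 17, 19, 23, 29] 31 6469693230 n else 10 := by rfl

set_option maxRecDepth 10000 in
theorem pvSieve16 : pvSieve 16 = [2, 3, 5, 7, 11, 13] := by rfl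
set_option maxRecDepth 10000 in
theorem pvSieve32 : pvSieve 32 = [2, 3, 5, 7, 11, 13, 17, 19, 23, 29, 31] := by rfl
theorem pvB16 (n : Int) : pvConsumeB [2, 3, 5, 7, 11, 13] 1 0 n =
    if n ≤ 2 then some 1 else if n ≤ 6 then some 2 else if n ≤ 30 then some 3
    else if n ≤ 210 then some 4 else if n ≤ 2310 then some 5
    else if n ≤ 30030 then some 6 else none := by rfl
theorem pvB32 (n : Int) : pvConsumeB [2, 3, 5, 7, 11, 13, 17, 19, 23, 29, 31] 1 0 n =
    if n ≤ 2 then some 1 else if n ≤ 6 then some 2 else if n ≤ 30 then some 3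
    else if n ≤ 210 then some 4 else if n ≤ 2310 then some 5
    else if n ≤ 30030 then some 6 else if n ≤ 510510 then some 7
    else if n ≤ 9699690 then some 8 else if n ≤ 223092870 then some 9
    else if n ≤ 6469693230 then some 10 else if n ≤ 200560490130 then some 11
    else none := by rfl

set_option maxHeartbeats 1000000 in
set_option maxRecDepth 10000 in
theorem pvBclosed (n : Int) (h : n ≤ 2147483648) : pvOuterB 2 16 n =
    if n ≤ 2 then 1 else if n ≤ 6 then 2 else if n ≤ 30 then 3
    else if n ≤ 210 then 4 else if n ≤ 2310 then 5 else if n ≤ 30030 then 6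
    else if n ≤ 510510 then 7 else if n ≤ 9699690 then 8
    else if n ≤ 223092870 then 9 else 10 := by
  have e1 : pvOuterB 2 16 n = match pvConsumeB (pvSieve 16) 1 0 n with
      | some c => c
      | none => pvOuterB 1 (16 * 2) n := by simp only [pvOuterB]
  have e2 : pvOuterB 1 (16 * 2) n = match pvConsumeB (pvSieve 32) 1 0 n with
      | some c => c
      | none => pvOuterB 0 (32 * 2) n := by norm_num; simp only [pvOuterB]
  rw [e1, pvSieve16, pvB16]
  split_ifs with h1 h2 h3 h4 h5 h6 <;>
    simp only [e2, pvSieve32, pvB32] <;> split_ifs <;> first | omega | simp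

set_option maxHeartbeats 4000000 in
theorem pvAclosed (n : Int) (h : n ≤ 2147483648) : pvLoopA 34 [2] 3 2 n =
    if n ≤ 2 then 1 else if n ≤ 6 then 2 else if n ≤ 30 then 3
    else if n ≤ 210 then 4 else if n ≤ 2310 then 5 else if n ≤ 30030 then 6
    else if n ≤ 510510 then 7 else if n ≤ 9699690 then 8
    else if n ≤ 223092870 then 9 else 10 := by
  rw [pvA0, pvA1, pvA2, pvA3, pvA4, pvA5, pvA6, pvA7, pvA8, pvA9, pvA10, pvA11,
      pvA12, pvA13, pvA14, pvA15, pvA16, pvA17, pvA18, pvA19, pvA20, pvA21,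
      pvA22, pvA23, pvA24, pvA25, pvA26, pvA27]
  split_ifs <;> omega

-- ===== VERDICT (by name: the statement is the Claim_ definition above) =====
theorem upper_primorial_lim_spec : Claim_equal_upper_primorial_lim := by
  intro n hdom
  have hd : n ≤ 2147483648 := by
    have := of_decide_eq_true hdom
    simpa [pvDomInt] using (of_decide_eq_true (by simpa [Dom_upper_primorial_lim, pvDomInt] using hdom) : -2147483648 ≤ n ∧ n ≤ 2147483648).2
  unfold Spec_upper_primorial_lim upper_primorial_lim upper_primorial_lim_alt
  rw [pvAclosed n hd, pvBclosed n hd]
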